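-- pv_equiv track=rewrite | github.com/SuryakantKumar/HackerRank-Problem-Solving | Easy Level/Happy-Ladybugs.py | CheckNext
-- ===== SOURCE A (Python) =====
-- def CheckNext(s):
--     flag = True
--     for i in range(1, len(s) -1):
--         if s[i] == s[i -1] or s[i] == s[i + 1]:
--             flag = True
--         else:
--             flag = False
--             return flag
--     return True
-- ===== SOURCE B (Python) =====
-- def CheckNext(s):
--     # Run-length decomposition: collect the lengths of consecutive equal-char
--     # runs, then require every run except the first and last to have length >= 2.
--     lens = []
--     prev = None
--     cur = 0
--     for ch in s:
--         if prev is not None and ch == prev: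
--             cur += 1
--         else:
--             if prev is not None:
--                 lens.append(cur)
--             prev = ch
--             cur = 1
--     if prev is not None:
--         lens.append(cur)
--     return all(k >= 2 for k in lens[1:-1])
-- ===== Notes on version B (the rewrite author's own statement) =====
-- stated objective: alternative
-- what changed: Replaced the interior-index loop comparing each char with both neighbors by a run-length decomposition: collect lengths of consecutive equal-char runs in one pass and require every run except the first and last to have length >= 2.
import Mathlib
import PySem

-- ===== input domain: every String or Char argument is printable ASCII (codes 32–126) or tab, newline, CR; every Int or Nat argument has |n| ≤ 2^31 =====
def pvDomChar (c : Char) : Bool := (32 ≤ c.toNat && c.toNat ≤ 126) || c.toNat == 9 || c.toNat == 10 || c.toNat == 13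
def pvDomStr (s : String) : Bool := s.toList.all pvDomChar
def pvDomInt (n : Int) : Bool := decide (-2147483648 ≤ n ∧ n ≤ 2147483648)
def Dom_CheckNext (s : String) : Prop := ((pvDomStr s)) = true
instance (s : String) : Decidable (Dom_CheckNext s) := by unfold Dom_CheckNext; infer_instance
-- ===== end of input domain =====

-- B replaces A's index loop over interior positions by a run-length decomposition
-- (collect consecutive-run lengths, then require every run except the first and
-- last to have length ≥ 2); same cost, different decomposition (objective: alternative).

-- ===== PORT A =====
-- loop body of A: early `return False` becomes returning `false`, the `flag`
-- variable is only ever `True` when the loop continues, so it is the recursion result.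
-- Indices 1 ≤ i ≤ len-2 are always in range, so the `==` on the two `pyGet?`
-- options is exactly Python's char comparison there.
def CheckNextGo (cs : List Char) : List Int → Bool
  | [] => true
  | i :: rest =>
      if (PySem.List.pyGet? cs i == PySem.List.pyGet? cs (i - 1))
          || (PySem.List.pyGet? cs i == PySem.List.pyGet? cs (i + 1)) then
        CheckNextGo cs rest
      else false

def CheckNext (s : String) : Bool :=
  CheckNextGo s.toList (PySem.List.pyRange 1 ((s.toList.length : Int) - 1) 1)

-- ===== PORT B =====
-- one step of Source B's for-loop: state is (lens, prev, cur)
def bStep (st : List Nat × Option Char × Nat) (ch : Char) : List Nat × Option Char × Nat :=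
  match st with
  | (lens, some p, cur) =>
      if ch = p then (lens, some p, cur + 1) else (lens ++ [cur], some ch, 1)
  | (lens, none, _) => (lens, some ch, 1)

def CheckNext_alt (s : String) : Bool :=
  let fin := s.toList.foldl bStep ([], none, 0)
  let lens := match fin with
    | (lens, some _, cur) => lens ++ [cur]
    | (lens, none, _) => lens
  (PySem.List.slice lens (some 1) (some (-1))).all (fun k => decide (2 ≤ k))

-- ===== PRECONDITION & SPEC =====
def Spec_CheckNext (s : String) (out : Bool) : Prop := out = CheckNext_alt s
instance (s : String) (out : Bool) : Decidable (Spec_CheckNext s out) := by unfold Spec_CheckNext; infer_instance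

-- ===== CLAIM (what is proved, stated in full; the proofs are below) =====
def Claim_equal_CheckNext : Prop := ∀ (s : String), Dom_CheckNext s → Spec_CheckNext s (CheckNext s)

-- ===== LEMMAS AND PROOFS =====

-- reference predicate: every interior char equals a neighbour
def triples : List Char → Bool
  | x :: y :: z :: t => ((y == x) || (y == z)) && triples (y :: z :: t)
  | _ => true

-- run lengths of c^n followed by t
def goRuns (c : Char) (n : Nat) : List Char → List Nat
  | [] => [n]
  | d :: t => if d = c then goRuns c (n + 1) t else n :: goRuns d 1 t

def lead (c : Char) : List Char → Nat
  | [] => 0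
  | d :: t => if d = c then lead c t + 1 else 0

def afterLead (c : Char) : List Char → List Char
  | [] => []
  | d :: t => if d = c then afterLead c t else d :: t

theorem goRuns_ne_nil (c : Char) (n : Nat) (t : List Char) : goRuns c n t ≠ [] := by
  induction t generalizing c n with
  | nil => simp [goRuns]
  | cons d t ih => by_cases h : d = c <;> simp [goRuns, h, ih]

theorem triples_strip (c : Char) (t : List Char) : triples (c :: c :: t) = triples (c :: t) := by
  cases t with
  | nil => simp [triples]
  | cons z w => simp [triples]

-- the run starting at d after a different char c: either d's run has length ≥ 2
-- (counted from 1 plus its leading continuation) or it is the last run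
theorem runs_mid (t' : List Char) (c d : Char) (hdc : d ≠ c) :
    ((decide (2 ≤ 1 + lead d t') || (afterLead d t').isEmpty) && triples (d :: t'))
      = triples (c :: d :: t') := by
  cases t' with
  | nil => simp [lead, afterLead, triples]
  | cons e t'' =>
      by_cases he : e = d
      · subst he
        simp [lead, afterLead, triples, triples_strip]
        exact fun _ => Or.inl (by omega)
      · simp [lead, afterLead, triples, he, hdc, beq_iff_eq]
        intro h; exact absurd h.symm he

theorem dropLast_goRuns (t : List Char) (c : Char) (n : Nat) :
    ((goRuns c n t).dropLast).all (fun k => decide (2 ≤ k))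
      = ((decide (2 ≤ n + lead c t) || (afterLead c t).isEmpty) && triples (c :: t)) := by
  induction t generalizing c n with
  | nil => simp [goRuns, lead, afterLead, triples]
  | cons d t' ih =>
      by_cases h : d = c
      · subst h
        rw [goRuns, if_pos rfl, ih, lead, if_pos rfl, afterLead, if_pos rfl, triples_strip]
        have : n + 1 + lead d t' = n + (lead d t' + 1) := by omega
        rw [this]
      · rw [goRuns, if_neg h,
            List.dropLast_cons_of_ne_nil (goRuns_ne_nil d 1 t'),
            List.all_cons, ih, runs_mid t' c d h, lead, if_neg h, afterLead, if_neg h]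
        simp

theorem tail_goRuns (t : List Char) (c : Char) (n : Nat) :
    (((goRuns c n t).tail).dropLast).all (fun k => decide (2 ≤ k)) = triples (c :: t) := by
  induction t generalizing c n with
  | nil => simp [goRuns, triples]
  | cons d t' ih =>
      by_cases h : d = c
      · subst h
        rw [goRuns, if_pos rfl, ih, triples_strip]
      · rw [goRuns, if_neg h, List.tail_cons, dropLast_goRuns, runs_mid t' c d h]

-- fold invariant for B's loop once a first char has been seen
theorem fold_goRuns (t : List Char) (lens : List Nat) (c : Char) (n : Nat) :
    (match t.foldl bStep (lens, some c, n) with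
      | (l, some _, cur) => l ++ [cur]
      | (l, none, _) => l) = lens ++ goRuns c n t := by
  induction t generalizing lens c n with
  | nil => simp [goRuns]
  | cons d t' ih =>
      by_cases h : d = c
      · subst h
        simp [bStep, goRuns, ih]
      · simp only [List.foldl_cons, bStep, goRuns, if_neg h, ih,
          List.append_assoc, List.cons_append, List.nil_append]

-- xs[1:-1] = xs.tail.dropLast
theorem slice_one_neg_one (l : List Nat) :
    PySem.List.slice l (some 1) (some (-1)) = l.tail.dropLast := by
  unfold PySem.List.slice
  simp [PySem.List.clampIdx]
  cases l with
  | nil => simp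
  | cons a t => simp [List.dropLast_eq_take]

-- B computes triples
theorem alt_eq_triples (s : String) : CheckNext_alt s = triples s.toList := by
  unfold CheckNext_alt
  cases hcs : s.toList with
  | nil => simp [triples, slice_one_neg_one]
  | cons c t =>
      simp only [List.foldl_cons, bStep]
      rw [fold_goRuns t [] c 1, List.nil_append, slice_one_neg_one, tail_goRuns]

-- A computes triples: walking the index range k+1 .. len-2 checks the triples of drop k
theorem go_eq_triples (rest : List Char) : ∀ (cs : List Char) (k : Nat) (x y : Char),
    cs.drop k = x :: y :: rest →
    CheckNextGo cs (PySem.List.pyRange ((k : Int) + 1) ((cs.length : Int) - 1) 1)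
      = triples (cs.drop k) := by
  induction rest with
  | nil =>
      intro cs k x y hdrop
      have hlen : cs.length = k + 2 := by
        have := congrArg List.length hdrop
        simp [List.length_drop] at this
        omega
      have : PySem.List.pyRange ((k : Int) + 1) ((cs.length : Int) - 1) 1 = [] := by
        rw [PySem.List.pyRange_one]
        have : (((cs.length : Int) - 1) - ((k : Int) + 1)).toNat = 0 := by
          rw [hlen]; omega
        rw [this]; simp
      rw [this, hdrop]
      simp [CheckNextGo, triples]
  | cons z rest' ih =>
      intro cs k x y hdrop
      have hlen : k + 3 ≤ cs.length := by
        have := congrArg List.length hdrop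
        simp [List.length_drop] at this
        omega
      have hx : cs[k]? = some x := by
        have : (cs.drop k)[0]? = some x := by rw [hdrop]; rfl
        simpa using this
      have hy : cs[k + 1]? = some y := by
        have : (cs.drop k)[1]? = some y := by rw [hdrop]; rfl
        simpa using this
      have hz : cs[k + 2]? = some z := by
        have : (cs.drop k)[2]? = some z := by rw [hdrop]; rfl
        simpa using this
      have hcons : PySem.List.pyRange ((k : Int) + 1) ((cs.length : Int) - 1) 1
          = ((k : Int) + 1) :: PySem.List.pyRange ((k : Int) + 1 + 1) ((cs.length : Int) - 1) 1 := by
        apply PySem.List.pyRange_one_cons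
        omega
      have hdrop' : cs.drop (k + 1) = y :: z :: rest' := by
        rw [← List.tail_drop, hdrop]; rfl
      have hrec := ih cs (k + 1) y z hdrop'
      have e4 : (((k + 1 : Nat)) : Int) + 1 = (((k + 2 : Nat)) : Int) := by push_cast; omega
      rw [e4] at hrec
      rw [hcons, CheckNextGo]
      have e1 : ((k : Int) + 1 - 1) = ((k : Nat) : Int) := by push_cast; omega
      have e2 : ((k : Int) + 1) = (((k + 1 : Nat)) : Int) := by push_cast; omega
      have e3 : ((k : Int) + 1 + 1) = (((k + 2 : Nat)) : Int) := by push_cast; omega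
      rw [e1, e2, e3] at *
      rw [PySem.List.pyGet?_natCast, PySem.List.pyGet?_natCast, PySem.List.pyGet?_natCast,
        hx, hy, hz, hdrop, hrec, hdrop']
      rw [triples]
      by_cases hcond : (y == x) || (y == z)
      · simp only [Option.some_beq_some] at *
        rw [if_pos hcond, hcond, Bool.true_and]
      · simp only [Option.some_beq_some] at *
        rw [if_neg hcond]
        rw [Bool.not_eq_true] at hcond
        rw [hcond, Bool.false_and]

theorem a_eq_triples (s : String) : CheckNext s = triples s.toList := by
  unfold CheckNext
  cases hcs : s.toList with
  | nil => simp [CheckNextGo, triples]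
  | cons a t =>
      cases t with
      | nil => simp [CheckNextGo, triples]
      | cons b t' =>
          have h := go_eq_triples t' (a :: b :: t') 0 a b (by simp)
          simpa using h

-- ===== VERDICT (by name: the statement is the Claim_ definition above) =====
theorem CheckNext_spec : Claim_equal_CheckNext := by
  intro s _
  unfold Spec_CheckNext
  rw [a_eq_triples, alt_eq_triples]
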